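-- pv_equiv track=rewrite | github.com/laurynukas98/Advent-Of-Code-My-Solutions | 2025/Solutions/day7/main.py | part1
-- ===== SOURCE A (Python) =====
-- def part1(data) -> str:
--     """starts masterpiece part 1"""
--     index = data[0].find("S")
--     drops = [index]
--     split = 0
--     for l in data[1:]:
--         new_drops = []
--         for drop in drops:
--             if l[drop] == "^":
--                 split += 1
--                 if (drop - 1 > -1):
--                     new_drops.append(drop - 1)
--                 if (drop + 1 < len(data[0])):
--                     new_drops.append(drop + 1)
--             elif l[drop] == ".":
--                 new_drops.append(drop)
--         drops = list(set(new_drops))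
--     return split
-- ===== SOURCE B (Python) =====
-- def part1(data) -> int:
--     """Bit-parallel: the frontier of active columns is one integer's bits."""
--     width = len(data[0])
--     s = data[0].find("S")
--     drops = 0 if s < 0 else 1 << s
--     full = (1 << width) - 1
--     split = 0
--     for row in data[1:]:
--         caret = 0
--         dot = 0
--         bit = 1
--         for ch in row[:width]:
--             if ch == "^":
--                 caret |= bit
--             elif ch == ".":
--                 dot |= bit
--             bit <<= 1
--         hit = drops & caret
--         split += bin(hit).count("1")
--         drops = (((hit >> 1) | (hit << 1)) & full) | (drops & dot)
--     return split
-- ===== Notes on version B (the rewrite author's own statement) =====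
-- stated objective: alternative
-- what changed: Replaces the per-drop list iteration with list(set(...)) dedup by bit-parallel integer masks: the whole frontier of active columns is one integer, each row is turned into caret/dot masks once, and splits are popcounted from drops & caret. Pre_ excludes the empty grid and grids with a row after the first shorter than the first row: on such rows A's l[drop] can raise IndexError; the bound is conservative (it also drops ragged grids whose short rows no drop reaches, where A = B, and ragged 'S'-less grids where A's negative-indexing pseudo-drop returns a count B does not reproduce).
-- intended difference: On grids whose first row has no 'S' and where the last column (which A tracks via find()'s -1 through Python's negative indexing) meets a '^' before any other non-'.' character, A counts splits from a drop that was never created and returns a positive count; B starts with no drops and returns 0, the intended value when the grid has no source. — e.g. on part1(["..", ".^"]): A returns 1, B returns 0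
-- outside the precondition, e.g. on part1(['S.', '']): A raises IndexError, B returns 0; on part1(['S.', '^', '..']): A returns 1, B returns 1; on part1(['ab', '^']): A returns 1, B returns 0
import Mathlib
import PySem

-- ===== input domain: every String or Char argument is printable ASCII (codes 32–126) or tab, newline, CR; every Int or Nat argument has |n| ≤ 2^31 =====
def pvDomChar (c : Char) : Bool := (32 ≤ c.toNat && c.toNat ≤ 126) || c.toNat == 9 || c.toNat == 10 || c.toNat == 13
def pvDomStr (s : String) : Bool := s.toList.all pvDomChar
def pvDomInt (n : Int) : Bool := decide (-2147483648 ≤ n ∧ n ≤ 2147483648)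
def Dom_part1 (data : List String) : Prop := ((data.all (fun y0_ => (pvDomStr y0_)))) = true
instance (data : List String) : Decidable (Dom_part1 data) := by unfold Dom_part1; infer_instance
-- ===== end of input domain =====

-- B replaces A's per-drop list iteration (with list(set(...)) dedup) by a bit-parallel
-- integer frontier: one integer's bits are the active columns, each row becomes caret/dot
-- masks and splits are popcounted from drops & caret; when the first row has no 'S', B
-- starts with no drops (intended difference D_: A's find() == -1 there accidentally tracks
-- the last column through Python's negative indexing).


-- ===== PORT A =====
-- Transliteration of A. data[0] is total here via getD "" (Pre_ demands data ≠ []);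
-- l[drop] via PySem.Str.pyGet?, whose `none` (Python IndexError) is excluded by Pre_
-- and, in that unreachable case, drops the drop. `list(set(new_drops))` is ported as
-- PySem.Set.ofList: CPython's set iteration order is not modelled, but the returned
-- split count does not depend on the order in which drops are visited.
-- body of A's inner `for drop in drops` loop
def pvADrop (row0 l : String) (st2 : Int × List Int) (drop : Int) : Int × List Int :=
  match PySem.Str.pyGet? l drop with
  | none => st2      -- Python raises IndexError at `l[drop]`; unreachable under Pre_part1
  | some c =>
      if c = '^' then
        (st2.1 + 1,
         st2.2 ++ (if drop - 1 > -1 then [drop - 1] else [])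
              ++ (if drop + 1 < PySem.Str.len row0 then [drop + 1] else []))
      else if c = '.' then (st2.1, st2.2 ++ [drop])
      else st2

-- body of A's outer `for l in data[1:]` loop
def pvAStep (row0 : String) (st : Int × List Int) (l : String) : Int × List Int :=
  let inner := st.2.foldl (pvADrop row0 l) (st.1, ([] : List Int))
  (inner.1, (PySem.Set.ofList inner.2 : List Int))

def part1 (data : List String) : Int :=
  let row0 := (PySem.List.pyGet? data 0).getD ""
  let index := PySem.Str.find row0 "S"
  ((data.drop 1).foldl (pvAStep row0) (0, [index])).1

-- ===== PORT B =====
-- Transliteration of Source B; Python's arbitrary-precision nonnegative masks are Nat.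
-- B-side helper: Source B's `bin(hit).count("1")` = the number of 1 bits of hit, ported as
-- the binary-digit recursion (fuel = x is enough since x halves each step).
def popcountAux : Nat → Nat → Nat
  | 0, _ => 0
  | fuel + 1, x => if x = 0 then 0 else x % 2 + popcountAux fuel (x / 2)

def popcountNat (x : Nat) : Nat := popcountAux x x

-- body of Source B's inner `for ch in row[:width]` loop (state: caret mask, dot mask, bit)
def pvMaskStep (m : Nat × Nat × Nat) (ch : Char) : Nat × Nat × Nat :=
  if ch = '^' then (m.1 ||| m.2.2, m.2.1, m.2.2 <<< 1)
  else if ch = '.' then (m.1, m.2.1 ||| m.2.2, m.2.2 <<< 1)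
  else (m.1, m.2.1, m.2.2 <<< 1)

-- body of Source B's `for row in data[1:]` loop (state: split, drops mask)
def pvBStep (width : Nat) (st : Int × Nat) (row : String) : Int × Nat :=
  let masks := (row.toList.take width).foldl pvMaskStep (0, 0, 1)
  let hit := st.2 &&& masks.1
  (st.1 + (popcountNat hit : Int),
   (((hit >>> 1) ||| (hit <<< 1)) &&& (((1 : Nat) <<< width) - 1)) ||| (st.2 &&& masks.2.1))

def part1_alt (data : List String) : Int :=
  let row0 := data.headD ""
  let width := (PySem.Str.len row0).toNat
  let s := PySem.Str.find row0 "S"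
  let drops0 : Nat := if s < 0 then 0 else 1 <<< s.toNat
  ((data.drop 1).foldl (pvBStep width) (0, drops0)).1

-- ===== PRECONDITION & SPEC =====
-- Pre_ excludes the empty list (data[0] raises IndexError) and grids with a row after
-- the first shorter than max(1, len(data[0])): on such rows A's l[drop] can raise
-- IndexError. The bound is conservative: it also drops ragged grids whose short rows
-- no drop reaches (there A = B) and ragged 'S'-less grids where A's negative-indexing
-- pseudo-drop returns a count B does not reproduce (the same quirk D_ documents).
def Pre_part1 (data : List String) : Prop :=
  data ≠ [] ∧ ∀ l ∈ data.drop 1,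
    (max 1 (PySem.Str.len (data.headD "")).toNat : Int) ≤ PySem.Str.len l
instance (data : List String) : Decidable (Pre_part1 data) := by
  unfold Pre_part1; infer_instance

def pvWitness_part1 : List String := ["S.", "^.", ".."]

-- On grids whose first row has no 'S' and where the last column (which A tracks via
-- find()'s -1 through Python's negative indexing) meets a '^' before any other non-'.'
-- character, A counts splits from a drop that was never created and returns a positive
-- count; B starts with no drops and returns 0, the intended value for a sourceless grid.
def D_part1 (data : List String) : Prop :=
  data ≠ [] ∧ 'S' ∉ (data.headD "").toList ∧
  (((data.drop 1).map (fun l => l.toList.getLast?)).dropWhile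
      (fun c => c == some '.')).head? = some (some '^')
instance (data : List String) : Decidable (D_part1 data) := by
  unfold D_part1; infer_instance

def Spec_part1 (data : List String) (out : Int) : Prop :=
  ¬ D_part1 data → out = part1_alt data
instance (data : List String) (out : Int) : Decidable (Spec_part1 data out) := by
  unfold Spec_part1; infer_instance

def pvDiffWitness_part1 : List String := ["..", ".^"]
def pvDiffWitnessOut_part1 : Int × Int := (1, 0)

-- ===== CLAIM =====
def Claim_unchanged_part1 : Prop :=
  ∀ (data : List String), Dom_part1 data → Pre_part1 data → Spec_part1 data (part1 data)
def Claim_changed_part1 : Prop :=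
  Dom_part1 (pvDiffWitness_part1) ∧ Pre_part1 (pvDiffWitness_part1) ∧
  D_part1 (pvDiffWitness_part1) ∧ part1 (pvDiffWitness_part1) = pvDiffWitnessOut_part1.1 ∧
  part1_alt (pvDiffWitness_part1) = pvDiffWitnessOut_part1.2 ∧
  pvDiffWitnessOut_part1.1 ≠ pvDiffWitnessOut_part1.2
def Claim_exact_part1 : Prop :=
  ∀ (data : List String), Dom_part1 data → Pre_part1 data → D_part1 data →
    part1 data ≠ part1_alt data

-- ===== LEMMAS AND PROOFS =====

-- proof-only helpers: the children a drop contributes, the hit predicate, the invariant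
def pvChildren (row0 l : String) (d : Int) : List Int :=
  match PySem.Str.pyGet? l d with
  | none => []
  | some c =>
      if c = '^' then
        (if d - 1 > -1 then [d - 1] else []) ++
        (if d + 1 < PySem.Str.len row0 then [d + 1] else [])
      else if c = '.' then [d]
      else []

def pvHot (l : String) (d : Int) : Bool := PySem.Str.pyGet? l d == some '^'

def pvInv (w : Nat) (ds : List Int) (m : Nat) : Prop :=
  ds.Nodup ∧ (∀ d ∈ ds, 0 ≤ d ∧ d < (w : Int)) ∧
  ∀ c : Nat, m.testBit c = true ↔ (c : Int) ∈ ds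

theorem popcountAux_congr (f g x : Nat) (hf : x ≤ f) (hg : x ≤ g) :
    popcountAux f x = popcountAux g x := by
  induction f using Nat.strong_induction_on generalizing g x with
  | _ f ih =>
    match f, g with
    | 0, g => interval_cases x; cases g <;> simp [popcountAux]
    | f + 1, 0 => interval_cases x; simp [popcountAux]
    | f + 1, g + 1 =>
      by_cases hx : x = 0
      · simp [popcountAux, hx]
      · simp only [popcountAux, if_neg hx]
        have h2 : x / 2 ≤ f := by omega
        have h2' : x / 2 ≤ g := by omega
        rw [ih f (by omega) g (x / 2) h2 h2']

theorem popcountNat_step (x : Nat) (hx : x ≠ 0) :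
    popcountNat x = x % 2 + popcountNat (x / 2) := by
  unfold popcountNat
  match x, hx with
  | x + 1, _ =>
    simp only [popcountAux, if_neg (by omega : ¬ x + 1 = 0)]
    rw [popcountAux_congr x ((x+1)/2) ((x+1)/2) (by omega) le_rfl]

theorem popcount_countP (k x : Nat) (h : x < 2 ^ k) :
    popcountNat x = (List.range k).countP x.testBit := by
  induction k generalizing x with
  | zero =>
    interval_cases x
    simp [popcountNat, popcountAux]
  | succ k ih =>
    by_cases hx : x = 0
    · subst hx
      simp only [popcountNat, popcountAux]
      rw [eq_comm, List.countP_eq_zero]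
      intro a _; simp [Nat.zero_testBit]
    · rw [popcountNat_step x hx, ih (x / 2) (by omega)]
      rw [List.range_succ_eq_map]
      rw [List.countP_cons, List.countP_map]
      have h0 : x.testBit 0 = decide (x % 2 = 1) := Nat.testBit_zero x
      have hs : ∀ c : Nat, x.testBit (c + 1) = (x / 2).testBit c := by
        intro c; exact Nat.testBit_add_one x c
      simp only [Function.comp_def]
      have heq : (List.range k).countP (fun a => x.testBit (a + 1)) = (List.range k).countP (x / 2).testBit := by
        apply List.countP_congr; intro a _; simp [hs]
      rw [heq, h0]
      have := Nat.mod_two_eq_zero_or_one x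
      rcases this with h2 | h2 <;> simp [h2] <;> omega

theorem lt_two_pow_of_testBit (x k : Nat) (h : ∀ i, x.testBit i = true → i < k) :
    x < 2 ^ k := by
  have hxk : x = x % 2 ^ k := by
    apply Nat.eq_of_testBit_eq
    intro i
    rw [Nat.testBit_mod_two_pow]
    by_cases hi : i < k
    · simp [hi]
    · simp only [hi, decide_false, Bool.false_and]
      by_contra hb
      exact hi (h i (by simpa using hb))
  rw [hxk]
  exact Nat.mod_lt _ (by positivity)

theorem pvMaskFold (cs : List Char) (k c0 d0 : Nat) :
    (cs.foldl pvMaskStep (c0, d0, 2 ^ k)).2.2 = 2 ^ (k + cs.length) ∧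
    (∀ j, ((cs.foldl pvMaskStep (c0, d0, 2 ^ k)).1.testBit j = true ↔
      (c0.testBit j = true ∨ ∃ i, cs[i]? = some '^' ∧ j = k + i))) ∧
    (∀ j, ((cs.foldl pvMaskStep (c0, d0, 2 ^ k)).2.1.testBit j = true ↔
      (d0.testBit j = true ∨ ∃ i, cs[i]? = some '.' ∧ j = k + i))) := by
  induction cs generalizing k c0 d0 with
  | nil =>
    refine ⟨by rw [List.foldl_nil, List.length_nil, Nat.add_zero], fun j => ?_, fun j => ?_⟩ <;>
      · rw [List.foldl_nil]
        constructor
        · exact fun h => Or.inl h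
        · rintro (h | ⟨i, hi, _⟩)
          · exact h
          · rw [List.getElem?_nil] at hi
            cases hi
  | cons ch cs ih =>
    have hbit : (2 : Nat) ^ k <<< 1 = 2 ^ (k + 1) := by
      rw [Nat.shiftLeft_eq]; ring
    have hcons : ∀ (t : Char) (j : Nat),
        ((∃ i, (ch :: cs)[i]? = some t ∧ j = k + i) ↔
         ((ch = t ∧ j = k) ∨ ∃ i, cs[i]? = some t ∧ j = (k + 1) + i)) := by
      intro t j
      constructor
      · rintro ⟨i, hi, rfl⟩
        cases i with
        | zero => left; simp at hi; simp [hi]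
        | succ i => right; exact ⟨i, by simpa using hi, by omega⟩
      · rintro (⟨rfl, rfl⟩ | ⟨i, hi, rfl⟩)
        · exact ⟨0, by simp, by omega⟩
        · exact ⟨i + 1, by simpa using hi, by omega⟩
    have hor : ∀ (m : Nat) (j : Nat), ((m ||| 2 ^ k).testBit j = true ↔ (m.testBit j = true ∨ j = k)) := by
      intro m j
      rw [Nat.testBit_or, Bool.or_eq_true, Nat.testBit_two_pow]
      simp only [decide_eq_true_eq]
      exact or_congr Iff.rfl ⟨fun h => h.symm, fun h => h.symm⟩
    rw [List.foldl_cons]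
    by_cases h1 : ch = '^'
    · subst h1
      simp only [pvMaskStep, if_true]
      rw [hbit]
      obtain ⟨e1, e2, e3⟩ := ih (k + 1) (c0 ||| 2 ^ k) d0
      refine ⟨by rw [e1, List.length_cons]; ring, fun j => ?_, fun j => ?_⟩
      · rw [e2 j, hcons '^' j, hor c0 j]
        constructor
        · rintro (ht | ht)
          · rcases ht with ht | ht
            · exact Or.inl ht
            · exact Or.inr (Or.inl ⟨rfl, ht⟩)
          · exact Or.inr (Or.inr ht)
        · rintro (ht | (⟨_, ht⟩ | ht))
          · exact Or.inl (Or.inl ht)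
          · exact Or.inl (Or.inr ht)
          · exact Or.inr ht
      · rw [e3 j, hcons '.' j]
        constructor
        · rintro (ht | ht)
          · exact Or.inl ht
          · exact Or.inr (Or.inr ht)
        · rintro (ht | (⟨hcc, _⟩ | ht))
          · exact Or.inl ht
          · exact absurd hcc (by decide)
          · exact Or.inr ht
    · by_cases h2 : ch = '.'
      · subst h2
        simp only [pvMaskStep, if_true]
        rw [if_neg (show ¬ ('.' : Char) = '^' by decide), hbit]
        obtain ⟨e1, e2, e3⟩ := ih (k + 1) c0 (d0 ||| 2 ^ k)
        refine ⟨by rw [e1, List.length_cons]; ring, fun j => ?_, fun j => ?_⟩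
        · rw [e2 j, hcons '^' j]
          constructor
          · rintro (ht | ht)
            · exact Or.inl ht
            · exact Or.inr (Or.inr ht)
          · rintro (ht | (⟨hcc, _⟩ | ht))
            · exact Or.inl ht
            · exact absurd hcc (by decide)
            · exact Or.inr ht
        · rw [e3 j, hcons '.' j, hor d0 j]
          constructor
          · rintro (ht | ht)
            · rcases ht with ht | ht
              · exact Or.inl ht
              · exact Or.inr (Or.inl ⟨rfl, ht⟩)
            · exact Or.inr (Or.inr ht)
          · rintro (ht | (⟨_, ht⟩ | ht))
            · exact Or.inl (Or.inl ht)
            · exact Or.inl (Or.inr ht)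
            · exact Or.inr ht
      · simp only [pvMaskStep]
        rw [if_neg h1, if_neg h2, hbit]
        obtain ⟨e1, e2, e3⟩ := ih (k + 1) c0 d0
        refine ⟨by rw [e1, List.length_cons]; ring, fun j => ?_, fun j => ?_⟩
        · rw [e2 j, hcons '^' j]
          constructor
          · rintro (ht | ht)
            · exact Or.inl ht
            · exact Or.inr (Or.inr ht)
          · rintro (ht | (⟨hcc, _⟩ | ht))
            · exact Or.inl ht
            · exact absurd hcc h1
            · exact Or.inr ht
        · rw [e3 j, hcons '.' j]
          constructor
          · rintro (ht | ht)
            · exact Or.inl ht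
            · exact Or.inr (Or.inr ht)
          · rintro (ht | (⟨hcc, _⟩ | ht))
            · exact Or.inl ht
            · exact absurd hcc h2
            · exact Or.inr ht

theorem pvInnerA (row0 l : String) (ds : List Int) (s0 : Int) (acc : List Int) :
    ds.foldl (pvADrop row0 l) (s0, acc) =
      (s0 + (ds.countP (pvHot l) : Int), acc ++ ds.flatMap (pvChildren row0 l)) := by
  induction ds generalizing s0 acc with
  | nil => simp
  | cons d ds ih =>
    rw [List.foldl_cons, List.countP_cons, List.flatMap_cons]
    cases h : PySem.Str.pyGet? l d with
    | none =>
      simp only [pvADrop, pvChildren, pvHot, h]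
      rw [ih]
      simp
    | some c =>
      by_cases hc : c = '^'
      · subst hc
        simp only [pvADrop, pvChildren, pvHot, h]
        rw [ih]
        simp [List.append_assoc]
        ring
      · by_cases hd : c = '.'
        · subst hd
          simp only [pvADrop, pvChildren, pvHot, h, if_neg (by decide : ¬ ('.' : Char) = '^')]
          rw [ih]
          simp
        · simp only [pvADrop, pvChildren, pvHot, h, if_neg hc, if_neg hd]
          rw [ih]
          have : (some c == some '^') = false := by simp [hc]
          simp [this]

theorem pvRowCore (row0 l : String) (w : Nat) (hw : PySem.Str.len row0 = (w : Int))
    (s : Int) (ds : List Int) (m : Nat) (hInv : pvInv w ds m) :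
    (pvAStep row0 (s, ds) l).1 = (pvBStep w (s, m) l).1 ∧
    pvInv w (pvAStep row0 (s, ds) l).2 (pvBStep w (s, m) l).2 := by
  obtain ⟨hnd, hbd, hbit⟩ := hInv
  obtain ⟨-, hcar0, hdot0⟩ := pvMaskFold (l.toList.take w) 0 0 0
  simp only [pow_zero] at hcar0 hdot0
  set caret := ((l.toList.take w).foldl pvMaskStep (0, 0, 1)).1 with hcaret
  set dot := ((l.toList.take w).foldl pvMaskStep (0, 0, 1)).2.1 with hdot
  have hcar : ∀ j : Nat, (caret.testBit j = true ↔ (j < w ∧ l.toList[j]? = some '^')) := by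
    intro j
    rw [hcar0 j, Nat.zero_testBit]
    simp only [Bool.false_eq_true, false_or, List.getElem?_take, Nat.zero_add]
    constructor
    · rintro ⟨i, hi, rfl⟩
      split at hi
      · exact ⟨by assumption, hi⟩
      · cases hi
    · rintro ⟨hj, hg⟩
      exact ⟨j, by rw [if_pos hj]; exact hg, rfl⟩
  have hdotc : ∀ j : Nat, (dot.testBit j = true ↔ (j < w ∧ l.toList[j]? = some '.')) := by
    intro j
    rw [hdot0 j, Nat.zero_testBit]
    simp only [Bool.false_eq_true, false_or, List.getElem?_take, Nat.zero_add]
    constructor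
    · rintro ⟨i, hi, rfl⟩
      split at hi
      · exact ⟨by assumption, hi⟩
      · cases hi
    · rintro ⟨hj, hg⟩
      exact ⟨j, by rw [if_pos hj]; exact hg, rfl⟩
  have hchar : ∀ d ∈ ds, PySem.Str.pyGet? l d = l.toList[d.toNat]? := by
    intro d hd
    have h0 : (d.toNat : Int) = d := Int.toNat_of_nonneg (hbd d hd).1
    conv_lhs => rw [PySem.Str.pyGet?_eq, PySem.Chars.pyGet?, ← h0, PySem.List.pyGet?_natCast]
  set hit := m &&& caret with hhitdef
  have hhit : ∀ j : Nat, (hit.testBit j = true ↔ ((j : Int) ∈ ds ∧ l.toList[j]? = some '^')) := by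
    intro j
    rw [hhitdef, Nat.testBit_and, Bool.and_eq_true, hbit j, hcar j]
    constructor
    · rintro ⟨h1, -, h2⟩
      exact ⟨h1, h2⟩
    · rintro ⟨h1, h2⟩
      obtain ⟨hb1, hb2⟩ := hbd _ h1
      exact ⟨h1, by omega, h2⟩
  have hhitlt : hit < 2 ^ w := by
    apply lt_two_pow_of_testBit
    intro i hi
    obtain ⟨hb1, hb2⟩ := hbd _ ((hhit i).1 hi).1
    omega
  have hperm : ds.Perm (List.map (fun c : Nat => (c : Int)) ((List.range w).filter m.testBit)) := by
    rw [List.perm_ext_iff_of_nodup hnd]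
    · intro x
      simp only [List.mem_map, List.mem_filter, List.mem_range]
      constructor
      · intro hx
        obtain ⟨hx1, hx2⟩ := hbd x hx
        refine ⟨x.toNat, ⟨by omega, ?_⟩, Int.toNat_of_nonneg (by omega)⟩
        rw [(hbit x.toNat).mpr (by rw [Int.toNat_of_nonneg (by omega)]; exact hx)]
      · rintro ⟨c, ⟨-, hc⟩, rfl⟩
        exact (hbit c).mp hc
    · refine List.Nodup.map ?_ (List.Nodup.filter _ List.nodup_range)
      intro a b hab
      exact Int.natCast_inj.mp hab
  have hcount : (ds.countP (pvHot l) : Int) = (popcountNat hit : Int) := by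
    rw [List.Perm.countP_eq _ hperm]
    rw [List.countP_map, List.countP_filter, popcount_countP w hit hhitlt]
    congr 1
    apply List.countP_congr
    intro c hc
    rw [List.mem_range] at hc
    simp only [Function.comp_def]
    rw [Bool.and_eq_true, hbit c]
    constructor
    · rintro ⟨hp, hmem⟩
      rw [(hhit c).mpr ⟨hmem, ?_⟩]
      have hcc : PySem.Str.pyGet? l (c : Int) = l.toList[((c : Int)).toNat]? :=
        hchar _ hmem
      rw [Int.toNat_natCast] at hcc
      unfold pvHot at hp
      rw [hcc] at hp
      exact eq_of_beq hp
    · intro hp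
      obtain ⟨hmem, hg⟩ := (hhit c).mp hp
      refine ⟨?_, hmem⟩
      unfold pvHot
      have hcc : PySem.Str.pyGet? l (c : Int) = l.toList[((c : Int)).toNat]? :=
        hchar _ hmem
      rw [Int.toNat_natCast] at hcc
      rw [hcc, hg]
      simp
  have hAstep : pvAStep row0 (s, ds) l =
      (s + (ds.countP (pvHot l) : Int), PySem.Set.ofList (ds.flatMap (pvChildren row0 l))) := by
    rw [pvAStep, pvInnerA row0 l ds s []]
    simp
  set m1 := (((hit >>> 1) ||| (hit <<< 1)) &&& (((1 : Nat) <<< w) - 1)) ||| (m &&& dot) with hm1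
  have hfull : ∀ j : Nat, ((1 <<< w - 1 : Nat).testBit j = decide (j < w)) := by
    intro j
    rw [Nat.shiftLeft_eq, Nat.one_mul, Nat.testBit_two_pow_sub_one]
  have hm1bit : ∀ c : Nat, (m1.testBit c = true ↔
      (((hit.testBit (1 + c) = true ∨ (1 ≤ c ∧ hit.testBit (c - 1) = true)) ∧ c < w) ∨
       (m.testBit c = true ∧ dot.testBit c = true))) := by
    intro c
    rw [hm1]
    simp only [Nat.testBit_or, Nat.testBit_and, Nat.testBit_shiftRight, Nat.testBit_shiftLeft,
      hfull c, Bool.or_eq_true, Bool.and_eq_true, decide_eq_true_eq, ge_iff_le]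
  have hmain : ∀ c : Nat, (m1.testBit c = true ↔
      ∃ d ∈ ds, (c : Int) ∈ pvChildren row0 l d) := by
    intro c
    rw [hm1bit c]
    constructor
    · rintro (⟨hsh, hcw⟩ | ⟨hmc, hdc⟩)
      · rcases hsh with hR | ⟨hc1, hL⟩
        · obtain ⟨hmem, hg⟩ := (hhit (1 + c)).mp hR
          refine ⟨((1 + c : Nat) : Int), hmem, ?_⟩
          have hcc : PySem.Str.pyGet? l ((1 + c : Nat) : Int) =
              l.toList[(((1 + c : Nat) : Int)).toNat]? := hchar _ hmem
          rw [Int.toNat_natCast] at hcc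
          rw [hg] at hcc
          simp only [pvChildren, hcc, if_true, List.mem_append]
          left
          rw [if_pos (by omega), List.mem_singleton]
          omega
        · obtain ⟨hmem, hg⟩ := (hhit (c - 1)).mp hL
          refine ⟨((c - 1 : Nat) : Int), hmem, ?_⟩
          have hcc : PySem.Str.pyGet? l ((c - 1 : Nat) : Int) =
              l.toList[(((c - 1 : Nat) : Int)).toNat]? := hchar _ hmem
          rw [Int.toNat_natCast] at hcc
          rw [hg] at hcc
          simp only [pvChildren, hcc, if_true, List.mem_append]
          right
          rw [if_pos (by rw [hw]; omega), List.mem_singleton]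
          omega
      · refine ⟨(c : Int), (hbit c).mp hmc, ?_⟩
        have hmem := (hbit c).mp hmc
        have hcc : PySem.Str.pyGet? l (c : Int) = l.toList[((c : Int)).toNat]? :=
          hchar _ hmem
        rw [Int.toNat_natCast, ((hdotc c).mp hdc).2] at hcc
        have hch : pvChildren row0 l ((c : Nat) : Int) = [(c : Int)] := by
          unfold pvChildren
          rw [hcc]
          simp
        rw [hch, List.mem_singleton]
    · rintro ⟨d, hd, hxd⟩
      obtain ⟨hd0, hdw⟩ := hbd d hd
      have hcc : PySem.Str.pyGet? l d = l.toList[d.toNat]? := hchar _ hd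
      cases hg : l.toList[d.toNat]? with
      | none => rw [hg] at hcc; simp only [pvChildren, hcc] at hxd; cases hxd
      | some ch =>
        rw [hg] at hcc
        simp only [pvChildren, hcc] at hxd
        by_cases h1 : ch = '^'
        · subst h1
          rw [if_pos rfl, List.mem_append] at hxd
          have hdhit : hit.testBit d.toNat = true :=
            (hhit d.toNat).mpr ⟨by rw [Int.toNat_of_nonneg hd0]; exact hd, hg⟩
          rcases hxd with hxd | hxd
          · by_cases hc1 : d - 1 > -1
            · rw [if_pos hc1, List.mem_singleton] at hxd
              left
              constructor
              · left
                have he : 1 + c = d.toNat := by omega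
                rw [he]
                exact hdhit
              · omega
            · rw [if_neg hc1] at hxd; cases hxd
          · by_cases hc2 : d + 1 < PySem.Str.len row0
            · rw [if_pos hc2, List.mem_singleton] at hxd
              rw [hw] at hc2
              left
              constructor
              · right
                refine ⟨by omega, ?_⟩
                have he : c - 1 = d.toNat := by omega
                rw [he]
                exact hdhit
              · omega
            · rw [if_neg hc2] at hxd; cases hxd
        · rw [if_neg h1] at hxd
          by_cases h2 : ch = '.'
          · subst h2
            rw [if_pos rfl, List.mem_singleton] at hxd
            right
            have hcd : (c : Int) = d := by omega
            constructor
            · rw [hbit c, hcd]; exact hd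
            · rw [(hdotc c)]
              refine ⟨by omega, ?_⟩
              have he : c = d.toNat := by omega
              rw [he, hg]
          · rw [if_neg h2] at hxd; cases hxd
  have hbnd : ∀ d ∈ ds, ∀ x ∈ pvChildren row0 l d, 0 ≤ x ∧ x < (w : Int) := by
    intro d hd x hxd
    obtain ⟨hd0, hdw⟩ := hbd d hd
    cases hg : PySem.Str.pyGet? l d with
    | none => simp only [pvChildren, hg] at hxd; cases hxd
    | some c =>
      simp only [pvChildren, hg] at hxd
      by_cases h1 : c = '^'
      · rw [if_pos h1, List.mem_append] at hxd
        rcases hxd with hxd | hxd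
        · by_cases hc1 : d - 1 > -1
          · rw [if_pos hc1, List.mem_singleton] at hxd
            subst hxd
            constructor <;> omega
          · rw [if_neg hc1] at hxd; cases hxd
        · by_cases hc2 : d + 1 < PySem.Str.len row0
          · rw [if_pos hc2, List.mem_singleton] at hxd
            subst hxd
            rw [hw] at hc2
            constructor <;> omega
          · rw [if_neg hc2] at hxd; cases hxd
      · rw [if_neg h1] at hxd
        by_cases h2 : c = '.'
        · rw [if_pos h2, List.mem_singleton] at hxd
          subst hxd
          constructor <;> omega
        · rw [if_neg h2] at hxd; cases hxd
  have hmemA : ∀ x : Int, (x ∈ (pvAStep row0 (s, ds) l).2 ↔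
      ∃ d ∈ ds, x ∈ pvChildren row0 l d) := by
    intro x
    rw [hAstep]
    rw [PySem.Set.mem_ofList, List.mem_flatMap]
  have hBstep : pvBStep w (s, m) l = (s + (popcountNat hit : Int), m1) := by
    rw [pvBStep, ← hcaret, ← hdot, ← hhitdef, ← hm1]
  rw [hBstep]
  refine ⟨?_, ?_, ?_, ?_⟩
  · rw [hAstep, hcount]
  · rw [hAstep]
    exact PySem.Set.nodup_ofList _
  · intro x hx
    obtain ⟨d, hd, hxd⟩ := (hmemA x).mp hx
    exact hbnd d hd x hxd
  · intro c
    rw [hmain c, hmemA (c : Nat)]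

theorem pvMain (row0 : String) (w : Nat) (hw : PySem.Str.len row0 = (w : Int))
    (R : List String) (s : Int) (ds : List Int) (m : Nat)
    (hInv : pvInv w ds m) :
    (R.foldl (pvAStep row0) (s, ds)).1 = (R.foldl (pvBStep w) (s, m)).1 := by
  induction R generalizing s ds m with
  | nil => rfl
  | cons l R ih =>
    rw [List.foldl_cons, List.foldl_cons]
    obtain ⟨h1, h2⟩ := pvRowCore row0 l w hw s ds m hInv
    have hstep := ih (pvBStep w (s, m) l).1 (pvAStep row0 (s, ds) l).2
      (pvBStep w (s, m) l).2 h2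
    rw [← Prod.mk.eta (p := pvAStep row0 (s, ds) l), h1]
    rw [← Prod.mk.eta (p := pvBStep w (s, m) l)]
    exact hstep

theorem pvInit (h : String) (h0 : 0 ≤ PySem.Str.find h "S") :
    pvInv h.toList.length [PySem.Str.find h "S"] (2 ^ (PySem.Str.find h "S").toNat) := by
  have hSl : "S".toList = ['S'] := by decide
  have hfind : PySem.Str.find h "S" = PySem.Chars.find h.toList ['S'] := by
    rw [PySem.Str.find_eq, hSl]
  have hpref := (PySem.Chars.find_spec (s := h.toList) (sub := ['S'])
    (by rw [← hfind]; exact h0)).1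
  have hlt : (PySem.Str.find h "S").toNat < h.toList.length := by
    obtain ⟨ts, hts⟩ := hpref
    have hlen := congrArg List.length hts
    rw [List.length_append, List.length_drop] at hlen
    have hle : PySem.Str.find h "S" ≤ (h.toList.length : Int) := by
      rw [hfind]
      exact PySem.Chars.find_le_length _ _
    rw [← hfind] at hlen
    simp only [List.length_cons, List.length_nil] at hlen
    omega
  refine ⟨List.nodup_singleton _, ?_, ?_⟩
  · intro d hd
    rw [List.mem_singleton] at hd
    subst hd
    constructor <;> omega
  · intro c
    rw [Nat.testBit_two_pow, List.mem_singleton]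
    constructor
    · intro hc
      have := of_decide_eq_true hc
      omega
    · intro hc
      exact decide_eq_true (by omega)

-- B's fold from an empty frontier stays at an empty frontier
theorem pvBZero (w : Nat) (R : List String) (s : Int) :
    (R.foldl (pvBStep w) (s, 0)).1 = s := by
  induction R generalizing s with
  | nil => rfl
  | cons l R ih =>
    have hstep : pvBStep w (s, 0) l = (s, 0) := by
      simp [pvBStep, Nat.zero_and, popcountNat, popcountAux, Nat.zero_shiftRight,
        Nat.zero_shiftLeft, Nat.zero_or]
    rw [List.foldl_cons, hstep, ih]

-- A's split count never decreases along the fold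
theorem pvAStep_le (row0 l : String) (st : Int × List Int) : st.1 ≤ (pvAStep row0 st l).1 := by
  rw [← Prod.mk.eta (p := st), pvAStep, pvInnerA]
  simp only
  have : (0 : Int) ≤ (st.2.countP (pvHot l) : Int) := Int.natCast_nonneg _
  omega

theorem pvAMono (row0 : String) (R : List String) (st : Int × List Int) :
    st.1 ≤ (R.foldl (pvAStep row0) st).1 := by
  induction R generalizing st with
  | nil => exact le_refl _
  | cons l R ih => exact le_trans (pvAStep_le row0 l st) (ih _)

-- A's fold from an empty frontier stays put
theorem pvAEmpty (row0 : String) (R : List String) (s : Int) :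
    (R.foldl (pvAStep row0) (s, [])).1 = s := by
  induction R generalizing s with
  | nil => rfl
  | cons l R ih =>
    have hstep : pvAStep row0 (s, []) l = (s, []) := by
      rw [pvAStep, List.foldl_nil]
      rfl
    rw [List.foldl_cons, hstep, ih]

-- l[-1] is the last character
theorem pvGetNeg1 (l : String) (h1 : 1 ≤ l.toList.length) :
    PySem.Str.pyGet? l (-1) = l.toList.getLast? := by
  rw [List.getLast?_eq_getElem?]
  rw [PySem.Str.pyGet?_eq, PySem.Chars.pyGet?]
  simp only [PySem.List.pyGet?, PySem.List.pyIdx?]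
  rw [if_neg (by omega), if_pos (by omega)]
  have hn : ((-(-1 : Int)).toNat) = 1 := by decide
  rw [hn]
  rfl

-- one step of A from the phantom state (0-split, frontier = [-1])
theorem pvAPhantomStep (row0 l : String) (s : Int) (h1 : 1 ≤ l.toList.length) :
    pvAStep row0 (s, [-1]) l =
      (if l.toList.getLast? = some '^' then
        (s + 1, (PySem.Set.ofList (if (0 : Int) < PySem.Str.len row0 then [(0 : Int)] else []) : List Int))
       else if l.toList.getLast? = some '.' then (s, [-1])
       else (s, [])) := by
  have hget : PySem.Str.pyGet? l (-1) = l.toList.getLast? := pvGetNeg1 l h1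
  rw [pvAStep, List.foldl_cons, List.foldl_nil]
  cases hL : l.toList.getLast? with
  | none =>
    rw [List.getLast?_eq_getElem?, List.getElem?_eq_none_iff] at hL
    omega
  | some c =>
    rw [hL] at hget
    have hdrop : pvADrop row0 l (s, ([] : List Int)) (-1) =
        (if c = '^' then
          (s + 1, if (0 : Int) < PySem.Str.len row0 then [(0 : Int)] else ([] : List Int))
         else if c = '.' then (s, [(-1 : Int)]) else (s, [])) := by
      simp only [pvADrop, hget]
      by_cases h1c : c = '^'
      · subst h1c
        rw [if_pos rfl, if_pos rfl, if_neg (by omega : ¬ ((-1 : Int) - 1 > -1))]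
        have e2 : ((-1 : Int) + 1) = 0 := by omega
        rw [e2]
        simp
      · by_cases h2c : c = '.'
        · subst h2c
          rw [if_neg h1c, if_neg h1c, if_pos rfl, if_pos rfl]
          try simp
        · rw [if_neg h1c, if_neg h1c, if_neg h2c, if_neg h2c]
    rw [hdrop]
    have hset1 : (PySem.Set.ofList [(-1 : Int)] : List Int) = [-1] := rfl
    have hset2 : (PySem.Set.ofList ([] : List Int) : List Int) = [] := rfl
    rcases eq_or_ne c '^' with h1c | h1c
    · subst h1c
      simp
    · rcases eq_or_ne c '.' with h2c | h2c
      · subst h2c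
        simp [h1c, hset1]
      · simp [h1c, h2c, hset2]

-- with no 'S' and no reachable '^' in the last column, A's count stays 0
theorem pvANoS (row0 : String) (R : List String)
    (hR : ∀ l ∈ R, 1 ≤ l.toList.length)
    (hnd : ((R.map (fun l => l.toList.getLast?)).dropWhile
        (fun c => c == some '.')).head? ≠ some (some '^')) :
    (R.foldl (pvAStep row0) (0, [-1])).1 = 0 := by
  induction R with
  | nil => rfl
  | cons l R ih =>
    have h1 : 1 ≤ l.toList.length := hR l (by simp)
    rw [List.foldl_cons, pvAPhantomStep row0 l 0 h1]
    rw [List.map_cons] at hnd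
    cases hL : l.toList.getLast? with
    | none =>
      rw [List.getLast?_eq_getElem?, List.getElem?_eq_none_iff] at hL
      omega
    | some c =>
      rw [hL] at hnd
      by_cases hc2 : c = '.'
      · subst hc2
        rw [List.dropWhile_cons, if_pos (by simp)] at hnd
        rw [if_neg (by simp), if_pos rfl]
        exact ih (fun l' hl' => hR l' (by simp [hl'])) hnd
      · rw [List.dropWhile_cons, if_neg (by simp [hc2]), List.head?_cons] at hnd
        have hc1 : c ≠ '^' := by
          intro hc
          exact hnd (by rw [hc])
        rw [if_neg (by simp [hc1]), if_neg (by simp [hc2]), pvAEmpty]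

-- with no 'S' but a '^' at the bottom of the last column before any other blocker, A counts ≥ 1
theorem pvAYesCaret (row0 : String) (R : List String)
    (hR : ∀ l ∈ R, 1 ≤ l.toList.length)
    (hd : ((R.map (fun l => l.toList.getLast?)).dropWhile
        (fun c => c == some '.')).head? = some (some '^')) :
    1 ≤ (R.foldl (pvAStep row0) (0, [-1])).1 := by
  induction R with
  | nil => cases hd
  | cons l R ih =>
    have h1 : 1 ≤ l.toList.length := hR l (by simp)
    rw [List.foldl_cons, pvAPhantomStep row0 l 0 h1]
    rw [List.map_cons] at hd
    cases hL : l.toList.getLast? with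
    | none =>
      rw [List.getLast?_eq_getElem?, List.getElem?_eq_none_iff] at hL
      omega
    | some c =>
      rw [hL] at hd
      by_cases hc2 : c = '.'
      · subst hc2
        rw [List.dropWhile_cons, if_pos (by simp)] at hd
        rw [if_neg (by simp), if_pos rfl]
        exact ih (fun l' hl' => hR l' (by simp [hl'])) hd
      · rw [List.dropWhile_cons, if_neg (by simp [hc2]), List.head?_cons] at hd
        injection hd with hd
        injection hd with hd
        subst hd
        rw [if_pos rfl]
        calc (1 : Int) = (0 : Int) + 1 := by omega
          _ ≤ _ := pvAMono row0 R _

-- 'S' membership in the first row decides the sign of find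
theorem pvFindNeg (h : String) :
    PySem.Str.find h "S" < 0 ↔ 'S' ∉ h.toList := by
  have hSl : "S".toList = ['S'] := by decide
  have hinf : ['S'] <:+: h.toList ↔ 'S' ∈ h.toList := by
    constructor
    · intro hx; exact (List.singleton_sublist).mp hx.sublist
    · intro hx
      obtain ⟨sx, tx, hx2⟩ := List.append_of_mem hx
      exact ⟨sx, tx, by rw [hx2]; simp⟩
  have hge : -1 ≤ PySem.Str.find h "S" := by
    rw [PySem.Str.find_eq]
    exact PySem.Chars.neg_one_le_find _ _
  constructor
  · intro hlt
    have : PySem.Str.find h "S" = -1 := by omega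
    have hni : ¬ ("S".toList <:+: h.toList) := by
      rw [← PySem.Chars.find_eq_neg_one_iff, ← PySem.Str.find_eq]
      exact this
    rw [hSl] at hni
    exact fun hmem => hni (hinf.mpr hmem)
  · intro hmem
    by_contra hge0
    push_neg at hge0
    have : "S".toList <:+: h.toList := by
      rw [← PySem.Chars.find_nonneg_iff, ← PySem.Str.find_eq]
      exact hge0
    rw [hSl] at this
    exact hmem (hinf.mp this)

theorem part1_unfoldA (h : String) (t : List String) :
    part1 (h :: t) = (t.foldl (pvAStep h) (0, [PySem.Str.find h "S"])).1 := by
  have hget : PySem.List.pyGet? (h :: t) (0 : Int) = some h := by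
    rw [← Int.natCast_zero, PySem.List.pyGet?_natCast]
    rfl
  simp only [part1, hget, Option.getD_some, List.drop_succ_cons, List.drop_zero]

theorem part1_unfoldB (h : String) (t : List String) :
    part1_alt (h :: t) =
      (t.foldl (pvBStep h.toList.length)
        (0, (if PySem.Str.find h "S" < 0 then 0 else 2 ^ (PySem.Str.find h "S").toNat))).1 := by
  have hw : (PySem.Str.len h).toNat = h.toList.length := by
    rw [PySem.Str.len_eq, Int.toNat_natCast]
  have hsh : (1 : Nat) <<< (PySem.Str.find h "S").toNat = 2 ^ (PySem.Str.find h "S").toNat := by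
    rw [Nat.shiftLeft_eq, Nat.one_mul]
  simp only [part1_alt, List.headD_cons, List.drop_succ_cons, List.drop_zero, hw, hsh]

-- rows after the first are nonempty and at least as long as the first, from Pre_
theorem pvRows (h : String) (t : List String) (hPre : Pre_part1 (h :: t)) :
    ∀ l ∈ t, h.toList.length ≤ l.toList.length ∧ 1 ≤ l.toList.length := by
  obtain ⟨-, hrows⟩ := hPre
  intro l hl
  have := hrows l (by simpa using hl)
  rw [List.headD_cons, PySem.Str.len_eq, Int.toNat_natCast, PySem.Str.len_eq] at this
  constructor <;> omega

-- ===== VERDICT =====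
theorem part1_spec : Claim_unchanged_part1 := by
  intro data hDom hPre hND
  match data with
  | [] => exact absurd rfl hPre.1
  | h :: t =>
    have hlen : PySem.Str.len h = (h.toList.length : Int) := PySem.Str.len_eq h
    have hrows := pvRows h t hPre
    show part1 (h :: t) = part1_alt (h :: t)
    rw [part1_unfoldA h t, part1_unfoldB h t]
    by_cases hS : PySem.Str.find h "S" < 0
    · rw [if_pos hS, pvBZero]
      have hfind : PySem.Str.find h "S" = -1 := by
        have : -1 ≤ PySem.Str.find h "S" := by
          rw [PySem.Str.find_eq]
          exact PySem.Chars.neg_one_le_find _ _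
        omega
      rw [hfind]
      apply pvANoS h t (fun l hl => (hrows l hl).2)
      intro hcond
      exact hND ⟨by simp, (pvFindNeg h).mp hS, by simpa using hcond⟩
    · rw [if_neg hS]
      push_neg at hS
      exact pvMain h h.toList.length hlen t 0 _ _ (pvInit h hS)

theorem part1_changed : Claim_changed_part1 := by
  unfold Claim_changed_part1
  decide

theorem part1_tight : Claim_exact_part1 := by
  intro data hDom hPre hD
  match data with
  | [] => exact absurd rfl hPre.1
  | h :: t =>
    obtain ⟨-, hmem, hcond⟩ := hD
    rw [List.headD_cons] at hmem
    have hS : PySem.Str.find h "S" < 0 := (pvFindNeg h).mpr hmem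
    have hfind : PySem.Str.find h "S" = -1 := by
      have : -1 ≤ PySem.Str.find h "S" := by
        rw [PySem.Str.find_eq]
        exact PySem.Chars.neg_one_le_find _ _
      omega
    have hrows := pvRows h t hPre
    rw [part1_unfoldA h t, part1_unfoldB h t, if_pos hS, pvBZero, hfind]
    have hge := pvAYesCaret h t (fun l hl => (hrows l hl).2) (by simpa using hcond)
    omega
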